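-- pv_equiv track=rewrite | github.com/yusufduman78/WardrobeAware | backend/routers/outfit.py | get_base_category
-- ===== SOURCE A (Python) =====
-- from typing import List, Optional
--
-- CATEGORY_TO_BASE = {
--     # Tops
--     "tops": "tops",
--     "shirts": "tops",
--     "blouses": "tops",
--     "t-shirts": "tops",
--     "sweaters": "tops",
--     "jackets": "tops",
--     "outerwear": "tops",
--
--     # Bottoms
--     "bottoms": "bottoms",
--     "pants": "bottoms",
--     "jeans": "bottoms",
--     "shorts": "bottoms",
--     "skirts": "bottoms",
--     "trousers": "bottoms",
--
--     # Shoes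
--     "shoes": "shoes",
--     "sneakers": "shoes",
--     "boots": "shoes",
--     "heels": "shoes",
--     "sandals": "shoes",
--
--     # All body (counts as both tops and bottoms)
--     "all_body": "both",  # Special case
--     "dresses": "both",
--     "jumpsuits": "both",
--     "rompers": "both",
-- }
--
-- def get_base_category(category: str) -> List[str]:
--     """
--     Map a category to base categories (tops, bottoms, shoes).
--     Returns list of base categories this item belongs to.
--     """
--     if not category or category == "unknown":
--         return []
--
--     category_lower = category.lower()
--
--     # Check direct mapping
--     if category_lower in CATEGORY_TO_BASE:
--         base = CATEGORY_TO_BASE[category_lower]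
--         if base == "both":
--             return ["tops", "bottoms"]
--         return [base]
--
--     # Check if category contains keywords
--     if any(keyword in category_lower for keyword in ["top", "shirt", "blouse", "sweater", "jacket", "outer"]):
--         return ["tops"]
--     if any(keyword in category_lower for keyword in ["bottom", "pant", "jean", "short", "skirt", "trouser"]):
--         return ["bottoms"]
--     if any(keyword in category_lower for keyword in ["shoe", "sneaker", "boot", "heel", "sandal"]):
--         return ["shoes"]
--     if any(keyword in category_lower for keyword in ["dress", "jumpsuit", "romper", "all_body"]):
--         return ["tops", "bottoms"]
--
--     # Default: return empty (not a base category)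
--     return []
-- ===== SOURCE B (Python) =====
-- KEYWORD_GROUPS = [
--     (["tops"], ["top", "shirt", "blouse", "sweater", "jacket", "outer"]),
--     (["bottoms"], ["bottom", "pant", "jean", "short", "skirt", "trouser"]),
--     (["shoes"], ["shoe", "sneaker", "boot", "heel", "sandal"]),
--     (["tops", "bottoms"], ["dress", "jumpsuit", "romper", "all_body"]),
-- ]
--
-- def get_base_category(category):
--     if not category or category == "unknown":
--         return []
--     category_lower = category.lower()
--     for bases, keywords in KEYWORD_GROUPS:
--         if any(keyword in category_lower for keyword in keywords):
--             return list(bases)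
--     return []
-- ===== Notes on version B (the rewrite author's own statement) =====
-- stated objective: simpler
-- what changed: Dropped the 26-entry CATEGORY_TO_BASE dict and its exact-lookup stage entirely; B is a single data-driven scan over four (bases, keywords) groups, since every dict key is covered by its own keyword group and no earlier one.
import Mathlib
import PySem

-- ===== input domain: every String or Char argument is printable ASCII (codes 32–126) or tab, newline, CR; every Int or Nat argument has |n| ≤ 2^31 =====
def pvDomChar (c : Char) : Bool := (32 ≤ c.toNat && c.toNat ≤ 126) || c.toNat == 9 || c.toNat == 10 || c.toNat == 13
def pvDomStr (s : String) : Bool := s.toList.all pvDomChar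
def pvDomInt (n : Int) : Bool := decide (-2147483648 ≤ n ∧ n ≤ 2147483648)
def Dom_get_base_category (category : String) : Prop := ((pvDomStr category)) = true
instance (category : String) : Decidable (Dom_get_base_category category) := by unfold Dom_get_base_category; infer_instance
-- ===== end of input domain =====

-- B replaces A's two-stage dict-lookup-then-keyword-fallback by one ordered keyword-group scan (simpler; same results).

-- ===== PORT A =====
def CATEGORY_TO_BASE : PySem.Dict String String := PySem.Dict.mk [
  ("tops", "tops"), ("shirts", "tops"), ("blouses", "tops"), ("t-shirts", "tops"),
  ("sweaters", "tops"), ("jackets", "tops"), ("outerwear", "tops"),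
  ("bottoms", "bottoms"), ("pants", "bottoms"), ("jeans", "bottoms"),
  ("shorts", "bottoms"), ("skirts", "bottoms"), ("trousers", "bottoms"),
  ("shoes", "shoes"), ("sneakers", "shoes"), ("boots", "shoes"),
  ("heels", "shoes"), ("sandals", "shoes"),
  ("all_body", "both"), ("dresses", "both"), ("jumpsuits", "both"), ("rompers", "both")]

def get_base_category (category : String) : List String :=
  if category = "" ∨ category = "unknown" then []
  else
    let cl := PySem.Str.lower category
    match CATEGORY_TO_BASE.get? cl with
    | some base => if base = "both" then ["tops", "bottoms"] else [base]
    | none =>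
      if (["top", "shirt", "blouse", "sweater", "jacket", "outer"].any fun k => PySem.Str.isIn k cl) then ["tops"]
      else if (["bottom", "pant", "jean", "short", "skirt", "trouser"].any fun k => PySem.Str.isIn k cl) then ["bottoms"]
      else if (["shoe", "sneaker", "boot", "heel", "sandal"].any fun k => PySem.Str.isIn k cl) then ["shoes"]
      else if (["dress", "jumpsuit", "romper", "all_body"].any fun k => PySem.Str.isIn k cl) then ["tops", "bottoms"]
      else []

-- ===== PORT B =====
def KEYWORD_GROUPS : List (List String × List String) :=
  [(["tops"], ["top", "shirt", "blouse", "sweater", "jacket", "outer"]),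
   (["bottoms"], ["bottom", "pant", "jean", "short", "skirt", "trouser"]),
   (["shoes"], ["shoe", "sneaker", "boot", "heel", "sandal"]),
   (["tops", "bottoms"], ["dress", "jumpsuit", "romper", "all_body"])]

-- the 'for bases, keywords in KEYWORD_GROUPS' loop with its early return
def scanGroups (cl : String) : List (List String × List String) → List String
  | [] => []
  | (bases, keywords) :: rest =>
    if (keywords.any fun k => PySem.Str.isIn k cl) then bases else scanGroups cl rest

def get_base_category_alt (category : String) : List String :=
  if category = "" ∨ category = "unknown" then []
  else scanGroups (PySem.Str.lower category) KEYWORD_GROUPS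

-- ===== PRECONDITION & SPEC =====
def Spec_get_base_category (category : String) (out : List String) : Prop := out = get_base_category_alt category
instance (category : String) (out : List String) : Decidable (Spec_get_base_category category out) := by unfold Spec_get_base_category; infer_instance

-- ===== CLAIM (what is proved, stated in full; the proofs are below) =====
def Claim_equal_get_base_category : Prop := ∀ (category : String), Dom_get_base_category category → Spec_get_base_category category (get_base_category category)

-- ===== LEMMAS AND PROOFS =====
-- core fact: on any lowered string, A's dict stage + keyword fallback equals B's single scan
set_option maxHeartbeats 2000000 in
lemma core_eq (cl : String) :
    (match CATEGORY_TO_BASE.get? cl with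
     | some base => if base = "both" then ["tops", "bottoms"] else [base]
     | none =>
       if (["top", "shirt", "blouse", "sweater", "jacket", "outer"].any fun k => PySem.Str.isIn k cl) then ["tops"]
       else if (["bottom", "pant", "jean", "short", "skirt", "trouser"].any fun k => PySem.Str.isIn k cl) then ["bottoms"]
       else if (["shoe", "sneaker", "boot", "heel", "sandal"].any fun k => PySem.Str.isIn k cl) then ["shoes"]
       else if (["dress", "jumpsuit", "romper", "all_body"].any fun k => PySem.Str.isIn k cl) then ["tops", "bottoms"]
       else []) = scanGroups cl KEYWORD_GROUPS := by
  by_cases e1 : ("tops" == cl) = true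
  · rw [beq_iff_eq] at e1; subst e1; decide
  by_cases e2 : ("shirts" == cl) = true
  · rw [beq_iff_eq] at e2; subst e2; decide
  by_cases e3 : ("blouses" == cl) = true
  · rw [beq_iff_eq] at e3; subst e3; decide
  by_cases e4 : ("t-shirts" == cl) = true
  · rw [beq_iff_eq] at e4; subst e4; decide
  by_cases e5 : ("sweaters" == cl) = true
  · rw [beq_iff_eq] at e5; subst e5; decide
  by_cases e6 : ("jackets" == cl) = true
  · rw [beq_iff_eq] at e6; subst e6; decide
  by_cases e7 : ("outerwear" == cl) = true
  · rw [beq_iff_eq] at e7; subst e7; decide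
  by_cases e8 : ("bottoms" == cl) = true
  · rw [beq_iff_eq] at e8; subst e8; decide
  by_cases e9 : ("pants" == cl) = true
  · rw [beq_iff_eq] at e9; subst e9; decide
  by_cases e10 : ("jeans" == cl) = true
  · rw [beq_iff_eq] at e10; subst e10; decide
  by_cases e11 : ("shorts" == cl) = true
  · rw [beq_iff_eq] at e11; subst e11; decide
  by_cases e12 : ("skirts" == cl) = true
  · rw [beq_iff_eq] at e12; subst e12; decide
  by_cases e13 : ("trousers" == cl) = true
  · rw [beq_iff_eq] at e13; subst e13; decide
  by_cases e14 : ("shoes" == cl) = true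
  · rw [beq_iff_eq] at e14; subst e14; decide
  by_cases e15 : ("sneakers" == cl) = true
  · rw [beq_iff_eq] at e15; subst e15; decide
  by_cases e16 : ("boots" == cl) = true
  · rw [beq_iff_eq] at e16; subst e16; decide
  by_cases e17 : ("heels" == cl) = true
  · rw [beq_iff_eq] at e17; subst e17; decide
  by_cases e18 : ("sandals" == cl) = true
  · rw [beq_iff_eq] at e18; subst e18; decide
  by_cases e19 : ("all_body" == cl) = true
  · rw [beq_iff_eq] at e19; subst e19; decide
  by_cases e20 : ("dresses" == cl) = true
  · rw [beq_iff_eq] at e20; subst e20; decide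
  by_cases e21 : ("jumpsuits" == cl) = true
  · rw [beq_iff_eq] at e21; subst e21; decide
  by_cases e22 : ("rompers" == cl) = true
  · rw [beq_iff_eq] at e22; subst e22; decide
  simp [CATEGORY_TO_BASE, PySem.Dict.get?, scanGroups, KEYWORD_GROUPS, e1, e2, e3, e4, e5, e6, e7, e8, e9, e10, e11, e12, e13, e14, e15, e16, e17, e18, e19, e20, e21, e22]

-- ===== VERDICT (by name: the statement is the Claim_ definition above) =====
theorem get_base_category_spec : Claim_equal_get_base_category := by
  intro category _
  unfold Spec_get_base_category get_base_category get_base_category_alt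
  by_cases h : category = "" ∨ category = "unknown"
  · simp [h]
  · simp only [h, if_false]
    exact core_eq (PySem.Str.lower category)
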